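-- pv_equiv track=rewrite | github.com/monuelo/PythonExamples | functions/feijoada.py | quantos_comeram
-- ===== SOURCE A (Python) =====
-- def quantos_comeram(N, fila):
-- 	comidas = 0
-- 	for i in range(len(fila)):
-- 		if fila[i] <= N:
-- 			comidas += fila[i]
-- 			N -= fila[i]
-- 		elif fila[i] > N:
-- 			break
-- 	return comidas
-- ===== SOURCE B (Python) =====
-- def quantos_comeram(N, fila):
--     # Pass 1: running prefix sums of the queue.
--     prefix = []
--     s = 0
--     for x in fila:
--         s += x
--         prefix.append(s)
--     # Pass 2: the last prefix sum still <= N, stopping at the first overflow.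
--     ans = 0
--     for s in prefix:
--         if s > N:
--             break
--         ans = s
--     return ans
-- ===== Notes on version B (the rewrite author's own statement) =====
-- stated objective: alternative
-- what changed: B builds the list of running prefix sums in one pass and then returns the last prefix sum that is still <= N (stopping at the first overflow), instead of A's single loop that maintains a shrinking remaining budget and an eaten-total accumulator.
import Mathlib
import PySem

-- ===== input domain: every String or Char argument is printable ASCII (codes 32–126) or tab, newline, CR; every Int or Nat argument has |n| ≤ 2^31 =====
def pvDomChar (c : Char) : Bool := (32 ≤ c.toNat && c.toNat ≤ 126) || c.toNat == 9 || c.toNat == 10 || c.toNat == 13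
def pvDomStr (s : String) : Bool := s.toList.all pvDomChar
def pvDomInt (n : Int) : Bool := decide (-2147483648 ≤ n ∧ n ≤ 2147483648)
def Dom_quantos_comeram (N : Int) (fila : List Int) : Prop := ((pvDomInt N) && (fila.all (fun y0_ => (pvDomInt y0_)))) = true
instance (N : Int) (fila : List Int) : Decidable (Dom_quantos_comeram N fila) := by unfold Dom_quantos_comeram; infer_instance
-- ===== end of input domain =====

-- B replaces A's shrinking-budget loop by prefix sums plus a last-prefix-sum-≤-N scan; objective: alternative (same cost).

-- ===== PORT A =====
-- index loop over range(len(fila)), carrying the remaining budget N and the eaten total comidas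
def quantosComeramLoopA (fila : List Int) (i : Nat) (N comidas : Int) : Int :=
  if h : i < fila.length then
    let x := fila[i]
    if x ≤ N then quantosComeramLoopA fila (i + 1) (N - x) (comidas + x)
    else comidas   -- elif fila[i] > N: break (always holds when x ≤ N fails)
  else comidas
termination_by fila.length - i

def quantos_comeram (N : Int) (fila : List Int) : Int :=
  quantosComeramLoopA fila 0 N 0

-- ===== PORT B =====
-- pass 1 of Source B: build the list of running prefix sums
def quantosComeramPrefix (fila : List Int) : List Int :=
  (fila.foldl (fun (acc : List Int × Int) x =>
      let s := acc.2 + x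
      (acc.1 ++ [s], s)) ([], 0)).1

-- pass 2 of Source B: last prefix sum still ≤ N, stopping at the first overflow
def quantosComeramScan (prefix_ : List Int) (N ans : Int) : Int :=
  match prefix_ with
  | [] => ans
  | s :: rest => if s > N then ans else quantosComeramScan rest N s

def quantos_comeram_alt (N : Int) (fila : List Int) : Int :=
  quantosComeramScan (quantosComeramPrefix fila) N 0

-- ===== PRECONDITION & SPEC =====
def Spec_quantos_comeram (N : Int) (fila : List Int) (out : Int) : Prop := out = quantos_comeram_alt N fila
instance (N : Int) (fila : List Int) (out : Int) : Decidable (Spec_quantos_comeram N fila out) := by unfold Spec_quantos_comeram; infer_instance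

-- ===== CLAIM (what is proved, stated in full; the proofs are below) =====
def Claim_equal_quantos_comeram : Prop := ∀ (N : Int) (fila : List Int), Dom_quantos_comeram N fila → Spec_quantos_comeram N fila (quantos_comeram N fila)

-- ===== LEMMAS AND PROOFS =====

-- structural version of A's loop on the not-yet-eaten suffix of the queue
def quantosComeramAux : List Int → Int → Int → Int
  | [], _, c => c
  | x :: xs, N, c => if x ≤ N then quantosComeramAux xs (N - x) (c + x) else c

theorem loopA_eq_aux (fila : List Int) (i : Nat) (N c : Int) :
    quantosComeramLoopA fila i N c = quantosComeramAux (fila.drop i) N c := by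
  induction hfuel : fila.length - i generalizing i N c with
  | zero =>
    rw [quantosComeramLoopA]
    have : ¬ i < fila.length := by omega
    rw [List.drop_eq_nil_of_le (by omega : fila.length ≤ i)]
    simp [this, quantosComeramAux]
  | succ k ih =>
    rw [quantosComeramLoopA]
    have hi : i < fila.length := by omega
    have hdrop : fila.drop i = fila[i] :: fila.drop (i + 1) :=
      List.drop_eq_getElem_cons hi
    simp only [hi, dif_pos, hdrop, quantosComeramAux]
    split
    · exact ih (i + 1) _ _ (by omega)
    · rfl

-- structural running-prefix-sum list with starting sum s
def quantosComeramAccum : List Int → Int → List Int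
  | [], _ => []
  | x :: xs, s => (s + x) :: quantosComeramAccum xs (s + x)

theorem prefix_fold_eq (fila : List Int) (acc : List Int) (s : Int) :
    (fila.foldl (fun (a : List Int × Int) x => (a.1 ++ [a.2 + x], a.2 + x)) (acc, s))
      = (acc ++ quantosComeramAccum fila s, s + (fila.foldr (· + ·) 0)) := by
  induction fila generalizing acc s with
  | nil => simp [quantosComeramAccum]
  | cons x xs ih =>
    simp only [List.foldl_cons, quantosComeramAccum, List.foldr_cons, ih]
    refine Prod.ext ?_ ?_
    · simp
    · ring

theorem aux_eq_scan (l : List Int) (N s : Int) :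
    quantosComeramAux l (N - s) s = quantosComeramScan (quantosComeramAccum l s) N s := by
  induction l generalizing s with
  | nil => rfl
  | cons x xs ih =>
    simp only [quantosComeramAux, quantosComeramAccum, quantosComeramScan]
    by_cases h : x ≤ N - s
    · have h2 : ¬ s + x > N := by omega
      have : N - s - x = N - (s + x) := by ring
      simp [h, h2, this, ih (s + x)]
    · have h2 : s + x > N := by omega
      simp [h, h2]

-- ===== VERDICT (by name: the statement is the Claim_ definition above) =====
theorem quantos_comeram_spec : Claim_equal_quantos_comeram := by
  intro N fila _
  show quantos_comeram N fila = quantos_comeram_alt N fila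
  unfold quantos_comeram quantos_comeram_alt quantosComeramPrefix
  rw [loopA_eq_aux]
  simp only [List.drop_zero]
  have := prefix_fold_eq fila [] 0
  simp only [List.nil_append] at this
  rw [this]
  have h := aux_eq_scan fila N 0
  simpa using h
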